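-- pv_equiv track=rewrite | github.com/IrinaShcherbakova/Leetcode-Python | leetcode/medium/longestOnes.py | form_zero_info
-- ===== SOURCE A (Python) =====
-- from typing import List
--
-- def form_zero_info(A: List[int]) -> List[List[int]]:
--     zero_info = []  # contains # of 1's to the left and to the right
--     ones, i = 0, 0
--     while i < len(A):
--         if A[i] == 1:
--             ones += 1
--             i += 1
--         else:   # new zero group starts at index i
--             if zero_info:
--                 zero_info[-1][1] = ones
--             zero_info.append([ones, 0])
--             j = i + 1  # skip consecutive zero's
--             while j < len(A) and A[j] == 0:
--                 zero_info.append([0,0])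
--                 j += 1
--             i = j
--             ones = 0
--     # set the right count of last zero to ones
--     if zero_info:
--         zero_info[-1][1] = ones
--     return zero_info
-- ===== SOURCE B (Python) =====
-- from typing import List
--
-- def _runs(xs: List[int]) -> List[int]:
--     # out[i] = number of consecutive 1s in xs ending immediately before index i
--     out, acc = [], 0
--     for x in xs:
--         out.append(acc)
--         acc = acc + 1 if x == 1 else 0
--     return out
--
-- def form_zero_info(A: List[int]) -> List[List[int]]:
--     left = _runs(A)
--     right = _runs(A[::-1])[::-1]
--     return [[l, r] for a, l, r in zip(A, left, right) if a != 1]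
-- ===== Notes on version B (the rewrite author's own statement) =====
-- stated objective: simpler
-- what changed: Replaces A's nested while loops with index jumps and in-place patching of the previous entry's right count by two independent run-length sweeps (forward and over the reversed list) and one filtered zip emitting [left,right] per non-1 element.
import Mathlib
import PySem

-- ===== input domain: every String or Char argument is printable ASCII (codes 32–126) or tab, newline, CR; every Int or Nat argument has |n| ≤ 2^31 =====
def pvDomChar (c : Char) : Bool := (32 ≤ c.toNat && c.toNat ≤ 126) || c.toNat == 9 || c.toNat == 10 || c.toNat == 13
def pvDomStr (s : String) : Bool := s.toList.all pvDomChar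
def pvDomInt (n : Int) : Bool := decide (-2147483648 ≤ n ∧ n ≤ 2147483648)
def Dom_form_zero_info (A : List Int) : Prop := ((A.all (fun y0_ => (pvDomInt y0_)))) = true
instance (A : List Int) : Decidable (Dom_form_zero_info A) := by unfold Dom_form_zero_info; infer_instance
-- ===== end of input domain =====

-- B replaces A's nested while loops (mutating the previous entry's right count) by two
-- independent run-length sweeps plus one filtered zip; objective: simpler.

-- ===== PORT A =====

-- the in-place 'zero_info[-1][1] = ones' on the last entry
def setLastRight (zi : List (List Int)) (v : Int) : List (List Int) :=
  match zi with
  | [] => []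
  | [l] => [l.set 1 v]
  | l :: l' :: ls => l :: setLastRight (l' :: ls) v

-- A's outer while loop, as recursion over the unprocessed suffix of A; the inner
-- 'skip consecutive zeros' while loop is the takeWhile/dropWhile split of the suffix.
def loopA (zi : List (List Int)) (ones : Int) (rest : List Int) : List (List Int) × Int :=
  match rest with
  | [] => (zi, ones)
  | x :: xs =>
    if x == 1 then
      loopA zi (ones + 1) xs
    else
      let zi1 := setLastRight zi ones
      let zi2 := zi1 ++ [[ones, 0]]
      let zs := xs.takeWhile (· == 0)
      let rest' := xs.dropWhile (· == 0)
      loopA (zi2 ++ zs.map (fun _ => [0, 0])) 0 rest'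
termination_by rest.length
decreasing_by
  · simp
  · have := List.length_dropWhile_le (· == (0:Int)) xs
    simp at this ⊢; omega

def form_zero_info (A : List Int) : List (List Int) :=
  let r := loopA [] 0 A
  setLastRight r.1 r.2

-- ===== PORT B =====

-- Source B's _runs: out[i] = acc carried along, acc reset at non-1s
def runsAlt (xs : List Int) (acc : Int) : List Int :=
  match xs with
  | [] => []
  | x :: xs' => acc :: runsAlt xs' (if x == 1 then acc + 1 else 0)

def form_zero_info_alt (A : List Int) : List (List Int) :=
  let left := runsAlt A 0
  let right := (runsAlt A.reverse 0).reverse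
  ((A.zip (left.zip right)).filter (fun p => p.1 != 1)).map (fun p => [p.2.1, p.2.2])

-- ===== PRECONDITION & SPEC =====
def Spec_form_zero_info (A : List Int) (out : List (List Int)) : Prop := out = form_zero_info_alt A
instance (A : List Int) (out : List (List Int)) : Decidable (Spec_form_zero_info A out) := by unfold Spec_form_zero_info; infer_instance

-- ===== CLAIM (what is proved, stated in full; the proofs are below) =====
def Claim_equal_form_zero_info : Prop := ∀ (A : List Int), Dom_form_zero_info A → Spec_form_zero_info A (form_zero_info A)

-- ===== LEMMAS AND PROOFS =====

-- number of leading 1s of a list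
def leadOnes : List Int → Int
  | [] => 0
  | x :: xs => if x == 1 then leadOnes xs + 1 else 0

-- common reference function: for each non-1 element, [ones before it, ones after it]
def F (ones : Int) : List Int → List (List Int)
  | [] => []
  | x :: xs => if x == 1 then F (ones + 1) xs else [ones, leadOnes xs] :: F 0 xs

lemma setLastRight_cons (a : List Int) (l : List (List Int)) (h : l ≠ []) (v : Int) :
    setLastRight (a :: l) v = a :: setLastRight l v := by
  cases l with
  | nil => exact absurd rfl h
  | cons b bs => rfl

lemma setLastRight_append (l1 l2 : List (List Int)) (h : l2 ≠ []) (v : Int) :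
    setLastRight (l1 ++ l2) v = l1 ++ setLastRight l2 v := by
  induction l1 with
  | nil => rfl
  | cons a l1 ih =>
      have h1 : l1 ++ l2 ≠ [] := by simp [h]
      simp only [List.cons_append, setLastRight_cons _ _ h1, ih]

lemma pad_shift (zs : List Int) (hz : ∀ z ∈ zs, z = 0) (ones : Int) (rest' : List Int) :
    setLastRight ([[ones, 0]] ++ zs.map (fun _ => [0, 0])) (leadOnes rest') ++ F 0 rest'
      = [ones, leadOnes (zs ++ rest')] :: F 0 (zs ++ rest') := by
  induction zs generalizing ones with
  | nil => simp [setLastRight, List.set]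
  | cons z zs ih =>
      have hz0 : z = 0 := hz z (List.mem_cons_self ..)
      have hzs : ∀ z ∈ zs, z = 0 := fun a ha => hz a (List.mem_cons_of_mem _ ha)
      have h2 : ([[(0:Int), 0]] ++ zs.map (fun _ => [0, 0])) ≠ [] := by simp
      have key := ih hzs 0
      calc setLastRight ([[ones, 0]] ++ (z :: zs).map (fun _ => [0, 0])) (leadOnes rest') ++ F 0 rest'
          = [ones, 0] :: (setLastRight ([[(0:Int), 0]] ++ zs.map (fun _ => [0, 0])) (leadOnes rest') ++ F 0 rest') := by
            rw [show ([[ones, 0]] ++ (z :: zs).map (fun _ => ([0, 0] : List Int)))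
                  = [ones, 0] :: ([[(0:Int), 0]] ++ zs.map (fun _ => [0, 0])) by simp,
                setLastRight_cons _ _ h2]
            simp
        _ = [ones, 0] :: [0, leadOnes (zs ++ rest')] :: F 0 (zs ++ rest') := by rw [key]
        _ = [ones, leadOnes ((z :: zs) ++ rest')] :: F 0 ((z :: zs) ++ rest') := by
            simp [hz0, leadOnes, F]

lemma loopA_eq (zi : List (List Int)) (ones : Int) (rest : List Int) :
    setLastRight (loopA zi ones rest).1 (loopA zi ones rest).2
      = setLastRight zi (ones + leadOnes rest) ++ F ones rest := by
  induction zi, ones, rest using loopA.induct with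
  | case1 zi ones => simp [loopA, leadOnes, F]
  | case2 zi ones x xs hx ih =>
      have hx' : x = 1 := by simpa using hx
      simp only [loopA, hx', BEq.rfl, if_true] at ih ⊢
      rw [ih]
      simp [leadOnes, F, add_assoc, add_comm 1 (leadOnes xs)]
  | case3 zi ones x xs hx zi1 zi2 zs rest' ih =>
      simp only [loopA, hx, Bool.false_eq_true, if_false]
      rw [ih]
      have hz : ∀ z ∈ zs, z = 0 := by
        intro z hzz
        simpa using List.mem_takeWhile_imp (p := (· == (0:Int))) hzz
      have h2 : ([[ones, 0]] ++ zs.map (fun _ => ([0,0] : List Int))) ≠ [] := by simp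
      have hx1 : (x == 1) = false := by simpa using hx
      calc setLastRight (zi2 ++ zs.map (fun _ => [0, 0])) (0 + leadOnes rest') ++ F 0 rest'
          = setLastRight zi ones ++ (setLastRight ([[ones, 0]] ++ zs.map (fun _ => [0, 0])) (leadOnes rest') ++ F 0 rest') := by
            rw [show zi2 ++ zs.map (fun _ => ([0,0] : List Int))
                  = setLastRight zi ones ++ ([[ones, 0]] ++ zs.map (fun _ => [0,0])) by simp [zi2, zi1],
                setLastRight_append _ _ h2]
            simp
        _ = setLastRight zi ones ++ ([ones, leadOnes (zs ++ rest')] :: F 0 (zs ++ rest')) := by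
            rw [pad_shift zs hz]
        _ = setLastRight zi (ones + leadOnes (x :: xs)) ++ F ones (x :: xs) := by
            have hsplit : zs ++ rest' = xs := by
              simp [zs, rest', List.takeWhile_append_dropWhile]
            rw [hsplit]
            simp [leadOnes, F, hx1]

lemma form_eq_F (A : List Int) : form_zero_info A = F 0 A := by
  have := loopA_eq [] 0 A
  simpa [form_zero_info, setLastRight] using this

-- acc after _runs has swept the whole list
def runEnd (xs : List Int) (acc : Int) : Int :=
  match xs with
  | [] => acc
  | x :: xs' => runEnd xs' (if x == 1 then acc + 1 else 0)

lemma runEnd_append (l1 l2 : List Int) (acc : Int) :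
    runEnd (l1 ++ l2) acc = runEnd l2 (runEnd l1 acc) := by
  induction l1 generalizing acc with
  | nil => rfl
  | cons x xs ih => simp [runEnd, ih]

lemma runsAlt_append_singleton (l : List Int) (x acc : Int) :
    runsAlt (l ++ [x]) acc = runsAlt l acc ++ [runEnd l acc] := by
  induction l generalizing acc with
  | nil => rfl
  | cons y ys ih => simp [runsAlt, runEnd, ih]

lemma runEnd_reverse (xs : List Int) : runEnd xs.reverse 0 = leadOnes xs := by
  induction xs with
  | nil => rfl
  | cons x xs ih =>
      rw [List.reverse_cons, runEnd_append]
      by_cases h : x = 1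
      · simp [runEnd, h, ih, leadOnes]
      · have : (x == 1) = false := by simpa using h
        simp [runEnd, this, leadOnes]

-- right array = per-suffix leading-ones, defined directly for the induction
def rightsSpec : List Int → List Int
  | [] => []
  | _ :: xs => leadOnes xs :: rightsSpec xs

lemma runsAlt_reverse (l : List Int) : (runsAlt l.reverse 0).reverse = rightsSpec l := by
  induction l with
  | nil => rfl
  | cons x xs ih =>
      rw [List.reverse_cons, runsAlt_append_singleton, runEnd_reverse]
      simp [rightsSpec, ih]

lemma zip_filter_eq_F (A : List Int) (acc : Int) :
    ((A.zip ((runsAlt A acc).zip (rightsSpec A))).filter (fun p => p.1 != 1)).map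
        (fun p => [p.2.1, p.2.2]) = F acc A := by
  induction A generalizing acc with
  | nil => rfl
  | cons x xs ih =>
      simp only [runsAlt, rightsSpec, List.zip_cons_cons, List.filter_cons]
      by_cases h : x = 1
      · have hb : (x == 1) = true := by simpa using h
        simpa [hb, h, F, List.zip] using ih (acc + 1)
      · have hb : (x == 1) = false := by simpa using h
        simpa [hb, h, F, List.zip] using ih 0

lemma alt_eq_F (A : List Int) : form_zero_info_alt A = F 0 A := by
  unfold form_zero_info_alt
  rw [runsAlt_reverse]
  exact zip_filter_eq_F A 0

-- ===== VERDICT (by name: the statement is the Claim_ definition above) =====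
theorem form_zero_info_spec : Claim_equal_form_zero_info := by
  intro A _
  unfold Spec_form_zero_info
  rw [form_eq_F, alt_eq_F]
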